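-- pv_equiv track=rewrite | github.com/SPIN-Research-Group/Spira | scripts/models/convert_weights.py | torchsparse_reorder
-- ===== SOURCE A (Python) =====
-- def torchsparse_reorder(kx, ky, kz):
--     stride = ky * kz
--     reorder = []
--
--     for base in range(stride):
--         for step in range(kx):
--             idx = base + step * stride
--             reorder.append(idx)
--
--     return reorder
-- ===== SOURCE B (Python) =====
-- def torchsparse_reorder(kx, ky, kz):
--     # Closed-form index map: output position p directly holds
--     # (p % kx) * stride + p // kx, instead of gathering via nested loops.
--     stride = ky * kz
--     if kx <= 0 or stride <= 0:
--         return []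
--     return [(p % kx) * stride + p // kx for p in range(kx * stride)]
-- ===== Notes on version B (the rewrite author's own statement) =====
-- stated objective: simpler
-- what changed: Replaces the base-major nested gather loops that append base+step*stride with a single comprehension over all kx*ky*kz output positions, computing each entry by the closed-form divmod formula (p%kx)*stride + p//kx.
import Mathlib
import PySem

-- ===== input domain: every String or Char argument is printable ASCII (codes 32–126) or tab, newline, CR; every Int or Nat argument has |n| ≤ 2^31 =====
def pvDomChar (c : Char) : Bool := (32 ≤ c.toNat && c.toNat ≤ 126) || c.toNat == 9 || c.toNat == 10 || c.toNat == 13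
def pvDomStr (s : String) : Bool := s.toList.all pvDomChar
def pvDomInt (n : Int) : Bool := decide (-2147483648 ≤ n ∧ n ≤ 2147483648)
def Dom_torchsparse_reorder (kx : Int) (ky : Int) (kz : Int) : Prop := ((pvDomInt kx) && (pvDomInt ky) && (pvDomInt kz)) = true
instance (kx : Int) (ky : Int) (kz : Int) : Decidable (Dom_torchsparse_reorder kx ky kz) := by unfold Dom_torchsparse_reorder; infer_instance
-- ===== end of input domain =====

-- B replaces A's nested base-major gather (append) by one comprehension over all
-- output positions, each computed by the closed-form divmod formula: simpler.

-- ===== PORT A =====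
def torchsparse_reorder (kx : Int) (ky : Int) (kz : Int) : List Int :=
  let stride := ky * kz
  (PySem.List.pyRange 0 stride 1).foldl (fun reorder base =>
    (PySem.List.pyRange 0 kx 1).foldl (fun reorder step =>
      reorder ++ [base + step * stride]) reorder) []

-- ===== PORT B =====
def torchsparse_reorder_alt (kx : Int) (ky : Int) (kz : Int) : List Int :=
  let stride := ky * kz
  if kx ≤ 0 ∨ stride ≤ 0 then []
  else (PySem.List.pyRange 0 (kx * stride) 1).map
    (fun p => PySem.Int.mod p kx * stride + PySem.Int.floordiv p kx)

-- ===== PRECONDITION & SPEC =====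
def Spec_torchsparse_reorder (kx : Int) (ky : Int) (kz : Int) (out : List Int) : Prop := out = torchsparse_reorder_alt kx ky kz
instance (kx : Int) (ky : Int) (kz : Int) (out : List Int) : Decidable (Spec_torchsparse_reorder kx ky kz out) := by unfold Spec_torchsparse_reorder; infer_instance

-- ===== CLAIM (what is proved, stated in full; the proofs are below) =====
def Claim_equal_torchsparse_reorder : Prop := ∀ (kx : Int) (ky : Int) (kz : Int), Dom_torchsparse_reorder kx ky kz → Spec_torchsparse_reorder kx ky kz (torchsparse_reorder kx ky kz)

-- ===== LEMMAS AND PROOFS =====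

-- f is the value both programs put at output position p (for kx=kxn>0, stride=st>0)
def pvF (kxn st p : Nat) : Int := ((p / kxn : Nat) : Int) + ((p % kxn : Nat) : Int) * ((st : Nat) : Int)

lemma pv_decomp (a b k : Nat) (hb : b < k) : (a * k + b) / k = a ∧ (a * k + b) % k = b := by
  have hk : 0 < k := lt_of_le_of_lt (Nat.zero_le b) hb
  constructor
  · rw [mul_comm, Nat.mul_add_div hk, Nat.div_eq_of_lt hb, add_zero]
  · rw [mul_comm a k, Nat.mul_add_mod, Nat.mod_eq_of_lt hb]

lemma pvA_flat (kxn st t : Nat) :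
    (List.range t).flatMap (fun b => (List.range kxn).map (fun s => ((b : Nat) : Int) + ((s : Nat) : Int) * ((st : Nat) : Int)))
      = (List.range (t * kxn)).map (pvF kxn st) := by
  induction t with
  | zero => simp
  | succ t ih =>
    rw [List.range_succ, List.flatMap_append, ih, Nat.succ_mul, List.range_add,
      List.map_append, List.map_map]
    congr 1
    simp only [List.flatMap_cons, List.flatMap_nil, List.append_nil]
    apply List.map_congr_left
    intro s hs
    have hs' : s < kxn := List.mem_range.mp hs
    have hd := pv_decomp t s kxn hs'
    simp only [Function.comp_apply, pvF, hd.1, hd.2]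

lemma pv_foldl_id {α β : Type} (l : List α) (init : List β) :
    l.foldl (fun r _ => r) init = init := by
  induction l generalizing init with
  | nil => rfl
  | cons x xs ih => exact ih init

-- A reduced to the flat map form (positive case)
lemma pvA_eq (kxn st : Nat) (kx ky kz : Int) (hx : kx = (kxn : Int)) (hs : ky * kz = (st : Int)) :
    torchsparse_reorder kx ky kz = (List.range (st * kxn)).map (pvF kxn st) := by
  have key : torchsparse_reorder kx ky kz
      = (List.range st).flatMap (fun b => (List.range kxn).map (fun s => ((b : Nat) : Int) + ((s : Nat) : Int) * ((st : Nat) : Int))) := by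
    simp only [torchsparse_reorder, hx, hs, PySem.List.foldl_append_singleton_eq_map,
      PySem.List.foldl_append_eq_flatMap, List.nil_append, PySem.List.pyRange_one, sub_zero,
      Int.toNat_natCast, zero_add, List.flatMap_map, List.map_map, Function.comp_def]
  rw [key, pvA_flat]

-- B reduced to the flat map form (positive case)
lemma pvB_eq (kxn st : Nat) (kx ky kz : Int) (hkx : 0 < kx) (hst : 0 < ky * kz)
    (hx : kx = (kxn : Int)) (hs : ky * kz = (st : Int)) :
    torchsparse_reorder_alt kx ky kz
      = (List.range (kxn * st)).map
          (fun p => ((p % kxn : Nat) : Int) * ((st : Nat) : Int) + ((p / kxn : Nat) : Int)) := by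
  simp only [torchsparse_reorder_alt, hx, hs]
  rw [if_neg (by push_neg; constructor <;> [exact hx ▸ hkx; exact hs ▸ hst]),
    show (kxn : Int) * (st : Int) = ((kxn * st : Nat) : Int) by push_cast; ring,
    PySem.List.pyRange_one]
  simp only [sub_zero, Int.toNat_natCast, zero_add, List.map_map]
  apply List.map_congr_left
  intro p _
  simp only [Function.comp_apply, PySem.Int.mod_natCast, PySem.Int.floordiv_natCast]

-- ===== VERDICT (by name: the statement is the Claim_ definition above) =====
theorem torchsparse_reorder_spec : Claim_equal_torchsparse_reorder := by
  intro kx ky kz _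
  unfold Spec_torchsparse_reorder
  by_cases hkx : 0 < kx
  · by_cases hst : 0 < ky * kz
    · -- positive case
      obtain ⟨kxn, hx⟩ : ∃ n : Nat, kx = (n : Int) := ⟨kx.toNat, (Int.toNat_of_nonneg hkx.le).symm⟩
      obtain ⟨st, hs⟩ : ∃ n : Nat, ky * kz = (n : Int) := ⟨(ky * kz).toNat, (Int.toNat_of_nonneg hst.le).symm⟩
      rw [pvA_eq kxn st kx ky kz hx hs, pvB_eq kxn st kx ky kz hkx hst hx hs, mul_comm st kxn]
      apply List.map_congr_left
      intro p _
      simp only [pvF]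
      ring
    · -- stride ≤ 0: both empty
      replace hst : ky * kz ≤ 0 := not_lt.mp hst
      have hA : torchsparse_reorder kx ky kz = [] := by
        simp only [torchsparse_reorder]
        rw [PySem.List.pyRange_one_eq_nil (a := 0) (b := ky * kz) hst, List.foldl_nil]
      have hB : torchsparse_reorder_alt kx ky kz = [] := by
        simp only [torchsparse_reorder_alt]
        rw [if_pos (Or.inr hst)]
      rw [hA, hB]
  · -- kx ≤ 0: both empty
    replace hkx : kx ≤ 0 := not_lt.mp hkx
    have hA : torchsparse_reorder kx ky kz = [] := by
      simp only [torchsparse_reorder, PySem.List.foldl_append_singleton_eq_map,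
        PySem.List.pyRange_one_eq_nil (show kx ≤ 0 from hkx), List.map_nil, List.append_nil]
      exact pv_foldl_id _ _
    have hB : torchsparse_reorder_alt kx ky kz = [] := by
      simp only [torchsparse_reorder_alt]
      rw [if_pos (Or.inl hkx)]
    rw [hA, hB]
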